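-- pv_equiv track=rewrite | github.com/UniLu419/leetcode | 49_group_anagrams.py | is_same
-- ===== SOURCE A (Python) =====
-- def is_same(hash_map1: dict[str, int], hash_map2: dict[str, int]) -> bool:
--     for key in hash_map1.keys():
--         if key not in hash_map2 or hash_map1[key] != hash_map2[key]:
--             return False
--     for key in hash_map2.keys():
--         if key not in hash_map1 or hash_map1[key] != hash_map2[key]:
--             return False
--     return True
-- ===== SOURCE B (Python) =====
-- def is_same(hash_map1: dict[str, int], hash_map2: dict[str, int]) -> bool:
--     if len(hash_map1) != len(hash_map2):
--         return False
--     return all(hash_map2.get(k) == v for k, v in hash_map1.items())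
-- ===== Notes on version B (the rewrite author's own statement) =====
-- stated objective: simpler
-- what changed: Replaced the two symmetric directional loops by a size comparison followed by a single all() pass over hash_map1's items using .get; the length check subsumes the reverse-direction loop.
import Mathlib
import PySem

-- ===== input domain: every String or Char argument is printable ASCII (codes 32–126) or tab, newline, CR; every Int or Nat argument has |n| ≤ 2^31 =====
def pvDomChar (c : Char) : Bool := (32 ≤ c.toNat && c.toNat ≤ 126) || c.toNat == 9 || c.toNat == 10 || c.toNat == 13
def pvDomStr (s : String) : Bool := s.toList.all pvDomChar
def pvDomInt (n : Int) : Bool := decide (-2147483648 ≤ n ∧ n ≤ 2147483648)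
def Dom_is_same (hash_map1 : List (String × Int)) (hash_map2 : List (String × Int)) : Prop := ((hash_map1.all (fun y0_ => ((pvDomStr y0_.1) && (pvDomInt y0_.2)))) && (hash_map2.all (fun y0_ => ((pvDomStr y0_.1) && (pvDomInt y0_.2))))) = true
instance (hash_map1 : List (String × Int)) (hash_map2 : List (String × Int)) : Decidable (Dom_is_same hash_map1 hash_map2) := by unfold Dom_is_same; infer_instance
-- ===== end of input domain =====

-- B replaces A's two symmetric directional loops by a size check plus one pass over hash_map1 (simpler).

-- ===== PORT A =====
-- second loop of A: for key in hash_map2.keys(): if key not in hash_map1 or hash_map1[key] != hash_map2[key]: return False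
def is_sameLoop2 (hash_map1 hash_map2 : List (String × Int)) : List (String × Int) → Bool
  | [] => true
  | p :: rest =>
      if hash_map1.lookup p.1 = none ∨ hash_map1.lookup p.1 ≠ hash_map2.lookup p.1 then false
      else is_sameLoop2 hash_map1 hash_map2 rest

-- first loop of A; when it finishes it falls through to the second loop and the final 'return True'
def is_sameLoop1 (hash_map1 hash_map2 : List (String × Int)) : List (String × Int) → Bool
  | [] => is_sameLoop2 hash_map1 hash_map2 hash_map2
  | p :: rest =>
      if hash_map2.lookup p.1 = none ∨ hash_map1.lookup p.1 ≠ hash_map2.lookup p.1 then false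
      else is_sameLoop1 hash_map1 hash_map2 rest

def is_same (hash_map1 : List (String × Int)) (hash_map2 : List (String × Int)) : Bool :=
  is_sameLoop1 hash_map1 hash_map2 hash_map1

-- ===== PORT B =====
def is_same_alt (hash_map1 : List (String × Int)) (hash_map2 : List (String × Int)) : Bool :=
  if hash_map1.length ≠ hash_map2.length then false
  else hash_map1.all (fun p => hash_map2.lookup p.1 == some p.2)

-- ===== PRECONDITION & SPEC =====
-- Pre_ states only the dict representation invariant: the arguments are Python dicts, so their
-- association lists carry pairwise-distinct keys; a list with duplicate first components
-- represents no Python input at all.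
def Pre_is_same (hash_map1 : List (String × Int)) (hash_map2 : List (String × Int)) : Prop :=
  (hash_map1.map Prod.fst).Nodup ∧ (hash_map2.map Prod.fst).Nodup
instance (hash_map1 : List (String × Int)) (hash_map2 : List (String × Int)) : Decidable (Pre_is_same hash_map1 hash_map2) := by unfold Pre_is_same; infer_instance

def pvWitness_is_same : (List (String × Int)) × (List (String × Int)) :=
  ([("a", 1), ("b", 2)], [("b", 2), ("a", 1)])

def Spec_is_same (hash_map1 : List (String × Int)) (hash_map2 : List (String × Int)) (out : Bool) : Prop := out = is_same_alt hash_map1 hash_map2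
instance (hash_map1 : List (String × Int)) (hash_map2 : List (String × Int)) (out : Bool) : Decidable (Spec_is_same hash_map1 hash_map2 out) := by unfold Spec_is_same; infer_instance

-- ===== CLAIM (what is proved, stated in full; the proofs are below) =====
def Claim_equal_is_same : Prop := ∀ (hash_map1 : List (String × Int)) (hash_map2 : List (String × Int)), Dom_is_same hash_map1 hash_map2 → Pre_is_same hash_map1 hash_map2 → Spec_is_same hash_map1 hash_map2 (is_same hash_map1 hash_map2)

-- ===== LEMMAS AND PROOFS =====

-- under Nodup keys a member pair is what lookup finds
theorem lookup_eq_some_of_mem {m : List (String × Int)} (hnd : (m.map Prod.fst).Nodup)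
    {p : String × Int} (hp : p ∈ m) : m.lookup p.1 = some p.2 := by
  induction m with
  | nil => cases hp
  | cons q rest ih =>
      simp only [List.map_cons, List.nodup_cons] at hnd
      rcases List.mem_cons.mp hp with hp | hp
      · subst hp; simp [List.lookup]
      · have hne : (p.1 == q.1) = false := by
          simp only [beq_eq_false_iff_ne]
          intro h
          exact hnd.1 (h ▸ List.mem_map_of_mem hp)
        simp [List.lookup, hne, ih hnd.2 hp]

theorem lookup_isSome_iff_mem_keys (m : List (String × Int)) (k : String) :
    (m.lookup k).isSome ↔ k ∈ m.map Prod.fst := by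
  induction m with
  | nil => simp [List.lookup]
  | cons q rest ih =>
      by_cases h : k = q.1
      · subst h; simp [List.lookup]
      · have hne : (k == q.1) = false := by simpa using h
        simp [List.lookup, hne, ih, h]

-- characterisation of A's second loop
theorem is_sameLoop2_eq_true_iff (m1 m2 l : List (String × Int)) :
    is_sameLoop2 m1 m2 l = true ↔
      ∀ p ∈ l, (m1.lookup p.1).isSome ∧ m1.lookup p.1 = m2.lookup p.1 := by
  induction l with
  | nil => simp [is_sameLoop2]
  | cons p rest ih =>
      simp only [is_sameLoop2]
      split_ifs with h
      · simp only [false_iff]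
        intro hall
        rcases hall p (by simp) with ⟨hs, he⟩
        rcases h with h | h
        · rw [h] at hs; simp at hs
        · exact h he
      · push Not at h
        simp only [ih, List.mem_cons]
        constructor
        · intro hall q hq
          rcases hq with hq | hq
          · subst hq; exact ⟨Option.isSome_iff_ne_none.mpr h.1, h.2⟩
          · exact hall q hq
        · intro hall q hq; exact hall q (Or.inr hq)

-- characterisation of A's first loop (it chains into the second)
theorem is_sameLoop1_eq_true_iff (m1 m2 l : List (String × Int)) :
    is_sameLoop1 m1 m2 l = true ↔
      (∀ p ∈ l, (m2.lookup p.1).isSome ∧ m1.lookup p.1 = m2.lookup p.1) ∧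
        is_sameLoop2 m1 m2 m2 = true := by
  induction l with
  | nil => simp [is_sameLoop1]
  | cons p rest ih =>
      simp only [is_sameLoop1]
      split_ifs with h
      · simp only [false_iff]
        intro hall
        rcases hall.1 p (by simp) with ⟨hs, he⟩
        rcases h with h | h
        · rw [h] at hs; simp at hs
        · exact h he
      · push Not at h
        simp only [ih, List.mem_cons]
        constructor
        · rintro ⟨hall, h2⟩
          refine ⟨fun q hq => ?_, h2⟩
          rcases hq with hq | hq
          · subst hq; exact ⟨Option.isSome_iff_ne_none.mpr h.1, h.2⟩
          · exact hall q hq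
        · rintro ⟨hall, h2⟩
          exact ⟨fun q hq => hall q (Or.inr hq), h2⟩

-- characterisation of B
theorem is_same_alt_eq_true_iff (m1 m2 : List (String × Int)) :
    is_same_alt m1 m2 = true ↔
      m1.length = m2.length ∧ ∀ p ∈ m1, m2.lookup p.1 = some p.2 := by
  unfold is_same_alt
  split_ifs with h
  · simp only [false_iff]
    intro hc; exact h hc.1
  · push Not at h
    simp [List.all_eq_true, h]

-- Nodup + mutual subset forces equal key sets and equal lengths
theorem toFinset_subset_of_subset (l1 l2 : List String) (hs : l1 ⊆ l2) :
    l1.toFinset ⊆ l2.toFinset := by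
  intro x hx; exact List.mem_toFinset.mpr (hs (List.mem_toFinset.mp hx))

theorem nodup_subset_length_le (l1 l2 : List String) (h1 : l1.Nodup) (hs : l1 ⊆ l2) :
    l1.length ≤ l2.length := by
  have hc := List.toFinset_card_le l2
  have hc1 := List.toFinset_card_of_nodup h1
  have := Finset.card_le_card (toFinset_subset_of_subset l1 l2 hs)
  omega

theorem nodup_subset_length_eq_mem (l1 l2 : List String) (h1 : l1.Nodup) (h2 : l2.Nodup)
    (hs : l1 ⊆ l2) (hl : l2.length ≤ l1.length) : l2 ⊆ l1 := by
  have heq : l1.toFinset = l2.toFinset := by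
    apply Finset.eq_of_subset_of_card_le (toFinset_subset_of_subset l1 l2 hs)
    rw [List.toFinset_card_of_nodup h1, List.toFinset_card_of_nodup h2]; exact hl
  intro x hx
  have hx2 : x ∈ l2.toFinset := List.mem_toFinset.mpr hx
  rw [← heq] at hx2
  exact List.mem_toFinset.mp hx2

theorem is_same_eq_alt (m1 m2 : List (String × Int))
    (h1 : (m1.map Prod.fst).Nodup) (h2 : (m2.map Prod.fst).Nodup) :
    is_same m1 m2 = is_same_alt m1 m2 := by
  rw [Bool.eq_iff_iff]
  rw [show is_same m1 m2 = is_sameLoop1 m1 m2 m1 from rfl]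
  rw [is_sameLoop1_eq_true_iff, is_sameLoop2_eq_true_iff, is_same_alt_eq_true_iff]
  constructor
  · rintro ⟨hfwd, hbwd⟩
    have hsub1 : m1.map Prod.fst ⊆ m2.map Prod.fst := by
      intro k hk
      rcases List.mem_map.mp hk with ⟨p, hp, rfl⟩
      exact (lookup_isSome_iff_mem_keys m2 p.1).mp (hfwd p hp).1
    have hsub2 : m2.map Prod.fst ⊆ m1.map Prod.fst := by
      intro k hk
      rcases List.mem_map.mp hk with ⟨p, hp, rfl⟩
      exact (lookup_isSome_iff_mem_keys m1 p.1).mp (hbwd p hp).1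
    have hle1 := nodup_subset_length_le _ _ h1 hsub1
    have hle2 := nodup_subset_length_le _ _ h2 hsub2
    simp only [List.length_map] at hle1 hle2
    refine ⟨by omega, fun p hp => ?_⟩
    rw [← (hfwd p hp).2]
    exact lookup_eq_some_of_mem h1 hp
  · rintro ⟨hlen, hall⟩
    have hsub1 : m1.map Prod.fst ⊆ m2.map Prod.fst := by
      intro k hk
      rcases List.mem_map.mp hk with ⟨p, hp, rfl⟩
      exact (lookup_isSome_iff_mem_keys m2 p.1).mp (by rw [hall p hp]; rfl)
    have hsub2 : m2.map Prod.fst ⊆ m1.map Prod.fst := by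
      apply nodup_subset_length_eq_mem _ _ h1 h2 hsub1
      simp [hlen]
    constructor
    · intro p hp
      refine ⟨by rw [hall p hp]; rfl, ?_⟩
      rw [lookup_eq_some_of_mem h1 hp, hall p hp]
    · intro p hp
      have hk1 : p.1 ∈ m1.map Prod.fst := hsub2 (List.mem_map_of_mem hp)
      rcases List.mem_map.mp hk1 with ⟨q, hq, hq1⟩
      have e2p : m2.lookup p.1 = some p.2 := lookup_eq_some_of_mem h2 hp
      have e2q : m2.lookup p.1 = some q.2 := by rw [← hq1]; exact hall q hq
      have e1 : m1.lookup p.1 = some q.2 := by rw [← hq1]; exact lookup_eq_some_of_mem h1 hq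
      refine ⟨by rw [e1]; rfl, ?_⟩
      have hv : q.2 = p.2 := Option.some.inj (e2q.symm.trans e2p)
      rw [e1, e2p, hv]

-- ===== VERDICT (by name: the statement is the Claim_ definition above) =====
theorem is_same_spec : Claim_equal_is_same := by
  intro m1 m2 _ hpre
  unfold Spec_is_same
  exact is_same_eq_alt m1 m2 hpre.1 hpre.2
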